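-- pv_equiv track=rewrite | github.com/JangoBoogaloo/LeetCodeExcercise | leetcodePython/Stack/stack_581.py | _getMinimumUnsortedLeftIndex
-- ===== SOURCE A (Python) =====
-- from typing import List
--
-- def _getMinimumUnsortedLeftIndex(nums: List[int]) -> int:
--     left = len(nums)
--     increaseNumIndexStack = []
--     for i in range(len(nums)):
--         while increaseNumIndexStack and nums[i] < nums[increaseNumIndexStack[-1]]:
--             left = min(left, increaseNumIndexStack.pop())
--         increaseNumIndexStack.append(i)
--     return left
-- ===== SOURCE B (Python) =====
-- from typing import List
--
-- def _getMinimumUnsortedLeftIndex(nums: List[int]) -> int: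
--     # Single right-to-left pass keeping a scalar running minimum of the suffix:
--     # index i is the answer boundary iff some later element is smaller than nums[i].
--     left = len(nums)
--     m = None
--     for i in range(len(nums) - 1, -1, -1):
--         v = nums[i]
--         if m is not None and v > m:
--             left = i
--         if m is None or v < m:
--             m = v
--     return left
-- ===== Notes on version B (the rewrite author's own statement) =====
-- stated objective: simpler
-- what changed: Replaced the monotonic index stack plus pop-time min bookkeeping by a single right-to-left pass that keeps only a scalar running suffix minimum and records the leftmost index whose value exceeds it.
import Mathlib
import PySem

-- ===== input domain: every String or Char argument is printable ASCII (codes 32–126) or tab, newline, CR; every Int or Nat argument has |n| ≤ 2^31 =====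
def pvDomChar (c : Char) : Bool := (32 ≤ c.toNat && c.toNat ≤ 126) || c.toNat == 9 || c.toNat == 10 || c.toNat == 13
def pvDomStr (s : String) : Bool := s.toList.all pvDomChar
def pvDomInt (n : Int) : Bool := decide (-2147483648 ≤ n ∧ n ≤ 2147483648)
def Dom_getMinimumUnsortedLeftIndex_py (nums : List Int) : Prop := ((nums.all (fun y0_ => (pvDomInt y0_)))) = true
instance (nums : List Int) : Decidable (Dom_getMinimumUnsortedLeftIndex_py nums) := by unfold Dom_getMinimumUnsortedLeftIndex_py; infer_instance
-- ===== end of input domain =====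

-- B replaces A's monotonic index stack by a single right-to-left pass with a scalar
-- running suffix minimum (objective: simpler, O(1) extra space).

-- ===== PORT A =====
-- inner `while increaseNumIndexStack and nums[i] < nums[increaseNumIndexStack[-1]]` loop;
-- the stack is a List Nat with head = Python's stack top; all indices accessed are in
-- range (i from range(len(nums)), t previously pushed from it), so nums.getD _ 0 is exact.
def popA (nums : List Int) (x : Int) : List Nat → Int → List Nat × Int
  | [], left => ([], left)
  | t :: rest, left =>
    if x < nums.getD t 0 then popA nums x rest (min left (t : Int)) else (t :: rest, left)

-- one iteration of the `for i in range(len(nums))` loop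
def stepA (nums : List Int) (s : List Nat × Int) (i : Nat) : List Nat × Int :=
  let r := popA nums (nums.getD i 0) s.1 s.2
  (i :: r.1, r.2)

def getMinimumUnsortedLeftIndex_py (nums : List Int) : Int :=
  ((List.range nums.length).foldl (stepA nums) ([], (nums.length : Int))).2

-- ===== PORT B =====
-- the `for i in range(len(nums)-1, -1, -1)` loop processes indices right-to-left, i.e.
-- the tail of the list before its head: transcribed as tail-first structural recursion;
-- state (left, m) with m : Option Int for Python's `m = None` sentinel.
def scanB (n : Nat) : Nat → List Int → Int × Option Int
  | _, [] => ((n : Int), none)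
  | i, v :: rest =>
    let r := scanB n (i + 1) rest
    let left := match r.2 with
      | some m => if v > m then (i : Int) else r.1
      | none => r.1
    let m' := match r.2 with
      | some m => if v < m then some v else some m
      | none => some v
    (left, m')

def getMinimumUnsortedLeftIndex_py_alt (nums : List Int) : Int :=
  (scanB nums.length 0 nums).1

-- ===== PRECONDITION & SPEC =====
def Spec_getMinimumUnsortedLeftIndex_py (nums : List Int) (out : Int) : Prop := out = getMinimumUnsortedLeftIndex_py_alt nums
instance (nums : List Int) (out : Int) : Decidable (Spec_getMinimumUnsortedLeftIndex_py nums out) := by unfold Spec_getMinimumUnsortedLeftIndex_py; infer_instance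

-- ===== CLAIM (what is proved, stated in full; the proofs are below) =====
def Claim_equal_getMinimumUnsortedLeftIndex_py : Prop := ∀ (nums : List Int), Dom_getMinimumUnsortedLeftIndex_py nums → Spec_getMinimumUnsortedLeftIndex_py nums (getMinimumUnsortedLeftIndex_py nums)

-- ===== LEMMAS AND PROOFS =====

-- `i` has some strictly smaller element to its right in `nums`
def pvBadSuf (nums : List Int) (i : Nat) : Bool :=
  (nums.drop (i + 1)).any (fun y => y < nums.getD i 0)

-- `i` has some strictly smaller element at an index j with i < j < k
def pvBadU (nums : List Int) (k i : Nat) : Bool :=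
  (List.range k).any (fun j => decide (i < j) && decide (nums.getD j 0 < nums.getD i 0))

-- minimum as computed by B's running scalar (none for the empty list)
def pvSMin : List Int → Option Int
  | [] => none
  | v :: rest => match pvSMin rest with
    | none => some v
    | some m => some (min v m)

def pvFirstBad (nums : List Int) (n : Nat) : Int :=
  ((((List.range nums.length).filter (fun k => pvBadSuf nums k)).headD n : Nat) : Int)

-- the accumulator update `left = min(left, ...)` as a named function
def pvMinF (l : Int) (t : Nat) : Int := min l (t : Int)

-- ---- B side ----

theorem scanB_snd (n i : Nat) (xs : List Int) : (scanB n i xs).2 = pvSMin xs := by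
  induction xs generalizing i with
  | nil => simp [scanB, pvSMin]
  | cons v rest ih =>
    cases h : pvSMin rest with
    | none => simp [scanB, pvSMin, h, ih]
    | some m =>
      simp only [scanB, pvSMin, h, ih]
      split <;> rename_i hv <;> simp only [Option.some.injEq] <;> omega

theorem any_lt_iff_smin (v : Int) (xs : List Int) :
    xs.any (fun y => y < v) = (match pvSMin xs with | none => false | some m => decide (m < v)) := by
  induction xs with
  | nil => simp [pvSMin]
  | cons w rest ih =>
    cases h : pvSMin rest with
    | none => simp [pvSMin, h, ih]
    | some m =>
      simp only [List.any_cons, pvSMin, h, ih]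
      by_cases h1 : w < v <;> by_cases h2 : m < v <;>
        simp [h1, h2] <;> omega

theorem scanB_fst (n : Nat) (xs : List Int) : ∀ i : Nat,
    (scanB n i xs).1 =
      ((((List.range xs.length).filter (fun k => pvBadSuf xs k)).head?.map
          (fun k => ((i + k : Nat) : Int))).getD (n : Int)) := by
  induction xs with
  | nil => intro i; simp [scanB]
  | cons v rest ih =>
    intro i
    have hsnd := scanB_snd n (i + 1) rest
    have hany := any_lt_iff_smin v rest
    have hfil : (List.range (v :: rest).length).filter (fun k => pvBadSuf (v :: rest) k)
        = (if rest.any (fun y => y < v) then [0] else [])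
          ++ ((List.range rest.length).filter (fun k => pvBadSuf rest k)).map Nat.succ := by
      rw [List.length_cons, List.range_succ_eq_map, List.filter_cons]
      have h0 : pvBadSuf (v :: rest) 0 = rest.any (fun y => y < v) := by
        simp [pvBadSuf]
      have hmap : ((List.range rest.length).map Nat.succ).filter (fun k => pvBadSuf (v :: rest) k)
          = ((List.range rest.length).filter (fun k => pvBadSuf rest k)).map Nat.succ := by
        rw [List.filter_map]
        have hpt : ∀ a ∈ List.range rest.length,
            ((fun k => pvBadSuf (v :: rest) k) ∘ Nat.succ) a = (fun k => pvBadSuf rest k) a := by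
          intro a _
          simp [pvBadSuf, Function.comp]
        rw [List.filter_congr hpt]
      rw [h0, hmap]
      cases hb : rest.any (fun y => y < v) <;> rfl
    cases h : pvSMin rest with
    | none =>
      have hrest : rest = [] := by
        cases rest with
        | nil => rfl
        | cons w r => cases hh : pvSMin r <;> simp [pvSMin, hh] at h
      subst hrest
      simp [scanB, pvBadSuf]
    | some m =>
      rw [h] at hsnd hany
      simp only [scanB, hsnd]
      by_cases hvm : m < v
      · have hT : rest.any (fun y => y < v) = true := by rw [hany]; simp [hvm]
        rw [hfil, hT]
        simp [hvm]
      · have hF : rest.any (fun y => y < v) = false := by rw [hany]; simp [hvm]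
        rw [hfil, hF]
        simp only [gt_iff_lt, hvm, if_false, Bool.false_eq_true, List.nil_append]
        rw [ih (i + 1)]
        cases hf : (List.range rest.length).filter (fun k => pvBadSuf rest k) with
        | nil => simp
        | cons a l =>
          simp only [List.map_cons, List.head?_cons, Option.map_some, Option.getD_some,
            Nat.succ_eq_add_one]
          push_cast
          omega

theorem alt_eq_firstBad (nums : List Int) :
    getMinimumUnsortedLeftIndex_py_alt nums = pvFirstBad nums nums.length := by
  unfold getMinimumUnsortedLeftIndex_py_alt pvFirstBad
  rw [scanB_fst]
  cases hf : (List.range nums.length).filter (fun k => pvBadSuf nums k) with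
  | nil => rfl
  | cons a l => simp

-- ---- A side ----

theorem popA_eq (nums : List Int) (x : Int) (st : List Nat) (left : Int) :
    popA nums x st left =
      (st.dropWhile (fun t => decide (x < nums.getD t 0)),
       (st.takeWhile (fun t => decide (x < nums.getD t 0))).foldl pvMinF left) := by
  induction st generalizing left with
  | nil => simp [popA]
  | cons t rest ih =>
    by_cases h : x < nums.getD t 0
    · have hd : decide (x < nums.getD t 0) = true := decide_eq_true h
      simp only [popA, if_pos h, List.takeWhile_cons, List.dropWhile_cons, hd, if_true,
        List.foldl_cons]
      rw [ih]
      rfl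
    · have hd : decide (x < nums.getD t 0) = false := decide_eq_false h
      simp only [popA, if_neg h, List.takeWhile_cons, List.dropWhile_cons, hd,
        Bool.false_eq_true, if_false, List.foldl_nil]

theorem pairwise_imp_mem {α : Type} {R S : α → α → Prop} (l : List α) (h : l.Pairwise R)
    (hp : ∀ a b, a ∈ l → b ∈ l → R a b → S a b) : l.Pairwise S := by
  induction l with
  | nil => exact List.Pairwise.nil
  | cons a l ih =>
    rcases List.pairwise_cons.mp h with ⟨ha, hl⟩
    refine List.pairwise_cons.mpr ⟨?_, ?_⟩
    · intro b hb
      exact hp a b (List.mem_cons_self) (List.mem_cons_of_mem a hb) (ha b hb)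
    · exact ih hl (fun a' b' ha' hb' => hp a' b' (List.mem_cons_of_mem a ha') (List.mem_cons_of_mem a hb'))

theorem takeWhile_eq_filter_of_pairwise {α : Type} {R : α → α → Prop} (p : α → Bool) (l : List α)
    (h : l.Pairwise R) (hp : ∀ a b, R a b → p a = false → p b = false) :
    l.takeWhile p = l.filter p ∧ l.dropWhile p = l.filter (fun a => !p a) := by
  induction l with
  | nil => simp
  | cons a l ih =>
    rcases List.pairwise_cons.mp h with ⟨ha, hl⟩
    cases hpa : p a with
    | true =>
      rcases ih hl with ⟨h1, h2⟩
      simp [List.takeWhile_cons, List.dropWhile_cons, List.filter_cons, hpa, h1, h2]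
    | false =>
      have hall : ∀ b ∈ l, p b = false := fun b hb => hp a b (ha b hb) hpa
      constructor
      · simp only [List.takeWhile_cons, hpa, List.filter_cons, Bool.false_eq_true, if_false]
        rw [List.filter_eq_nil_iff.mpr (fun b hb => by simp [hall b hb])]
      · simp only [List.dropWhile_cons, hpa, List.filter_cons, Bool.false_eq_true, if_false,
          Bool.not_false, if_true]
        rw [List.filter_eq_self.mpr (fun b hb => by simp [hall b hb])]

def pvStInv (nums : List Int) (k : Nat) : List Nat :=
  ((List.range k).filter (fun i => ! pvBadU nums k i)).reverse

def pvLeftInv (nums : List Int) (k : Nat) : Int :=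
  ((List.range k).filter (fun i => pvBadU nums k i)).foldl pvMinF (nums.length : Int)

theorem foldl_min_perm (l₁ l₂ : List Nat) (h : l₁.Perm l₂) (init : Int) :
    l₁.foldl pvMinF init = l₂.foldl pvMinF init := by
  exact List.Perm.foldl_eq (rcomm := ⟨fun b a a' => by unfold pvMinF; omega⟩) h init

theorem stInv_pairwise (nums : List Int) (k : Nat) :
    (pvStInv nums k).Pairwise (fun a b => nums.getD b 0 ≤ nums.getD a 0) := by
  unfold pvStInv
  rw [List.pairwise_reverse]
  have hsub : ((List.range k).filter (fun i => ! pvBadU nums k i)).Pairwise (· < ·) :=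
    List.pairwise_lt_range.sublist List.filter_sublist
  refine pairwise_imp_mem _ hsub ?_
  intro a b hma hmb hab
  have hbk : b < k := List.mem_range.mp (List.mem_filter.mp hmb).1
  have hnb : pvBadU nums k a = false := by
    have h0 := (List.mem_filter.mp hma).2
    cases hba : pvBadU nums k a
    · rfl
    · rw [hba] at h0; simp at h0
  have hforall := List.any_eq_false.mp hnb b (List.mem_range.mpr hbk)
  simp only [Bool.and_eq_true, decide_eq_true_eq, not_and, not_lt] at hforall
  exact hforall hab

theorem badU_succ (nums : List Int) (k i : Nat) (hi : i < k) :
    pvBadU nums (k + 1) i = (pvBadU nums k i || decide (nums.getD k 0 < nums.getD i 0)) := by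
  simp [pvBadU, List.range_succ, hi]

theorem badU_self (nums : List Int) (k : Nat) : pvBadU nums (k + 1) k = false := by
  simp only [pvBadU]
  rw [List.any_eq_false]
  intro j hj
  have hjk := List.mem_range.mp hj
  simp only [Bool.and_eq_true, decide_eq_true_eq, not_and]
  intro hkj
  omega

theorem stepA_inv (nums : List Int) (k : Nat) (hk : k < nums.length) :
    stepA nums (pvStInv nums k, pvLeftInv nums k) k = (pvStInv nums (k + 1), pvLeftInv nums (k + 1)) := by
  have hpw := stInv_pairwise nums k
  have htd := takeWhile_eq_filter_of_pairwise
      (fun t => decide (nums.getD k 0 < nums.getD t 0)) (pvStInv nums k) hpw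
      (by intro a b hR hpa
          rw [decide_eq_false_iff_not] at hpa ⊢
          omega)
  have hdw : (pvStInv nums k).dropWhile (fun t => decide (nums.getD k 0 < nums.getD t 0))
      = (pvStInv nums k).filter (fun t => !decide (nums.getD k 0 < nums.getD t 0)) := htd.2
  have htw : (pvStInv nums k).takeWhile (fun t => decide (nums.getD k 0 < nums.getD t 0))
      = (pvStInv nums k).filter (fun t => decide (nums.getD k 0 < nums.getD t 0)) := htd.1
  have hpop := popA_eq nums (nums.getD k 0) (pvStInv nums k) (pvLeftInv nums k)
  unfold stepA
  rw [hpop, hdw, htw]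
  rw [Prod.mk.injEq]
  refine ⟨?_, ?_⟩
  · -- stack component
    unfold pvStInv
    rw [List.range_succ, List.filter_append]
    have hk0 : (List.filter (fun i => !pvBadU nums (k+1) i) [k]) = [k] := by
      simp [List.filter_cons, badU_self]
    rw [hk0, List.reverse_append]
    simp only [List.reverse_cons, List.reverse_nil, List.nil_append, List.singleton_append]
    congr 1
    rw [List.filter_reverse]
    congr 1
    rw [List.filter_filter]
    apply List.filter_congr
    intro a ha
    have hak : a < k := List.mem_range.mp ha
    rw [badU_succ nums k a hak]
    cases pvBadU nums k a <;> cases hd : decide (nums.getD k 0 < nums.getD a 0) <;> simp [hd]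
  · -- left component
    unfold pvLeftInv
    rw [List.range_succ, List.filter_append]
    have hk0 : (List.filter (fun i => pvBadU nums (k+1) i) [k]) = [] := by
      simp [List.filter_cons, badU_self]
    rw [hk0, List.append_nil]
    have hperm : ((List.range k).filter (fun i => pvBadU nums (k+1) i)).Perm
        (((List.range k).filter (fun i => pvBadU nums k i)) ++
         ((List.range k).filter (fun i =>
            decide (nums.getD k 0 < nums.getD i 0) && !pvBadU nums k i))) := by
      have hbase := (List.filter_append_perm (fun i => pvBadU nums k i) (List.range k)).symm
      have h2 := hbase.filter (fun i => pvBadU nums (k+1) i)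
      rw [List.filter_append] at h2
      have e1 : ((List.range k).filter (fun i => pvBadU nums k i)).filter
          (fun i => pvBadU nums (k+1) i) = (List.range k).filter (fun i => pvBadU nums k i) := by
        rw [List.filter_filter]
        apply List.filter_congr
        intro a ha
        have hak : a < k := List.mem_range.mp ha
        rw [badU_succ nums k a hak]
        cases pvBadU nums k a <;> simp
      have e2 : ((List.range k).filter (fun i => !pvBadU nums k i)).filter
          (fun i => pvBadU nums (k+1) i)
          = (List.range k).filter (fun i =>
              decide (nums.getD k 0 < nums.getD i 0) && !pvBadU nums k i) := by
        rw [List.filter_filter]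
        apply List.filter_congr
        intro a ha
        have hak : a < k := List.mem_range.mp ha
        rw [badU_succ nums k a hak]
        cases pvBadU nums k a <;> cases hd : decide (nums.getD k 0 < nums.getD a 0) <;> simp [hd]
      rw [e1, e2] at h2
      exact h2
    rw [foldl_min_perm _ _ hperm, List.foldl_append]
    have hst : (pvStInv nums k).filter (fun t => decide (nums.getD k 0 < nums.getD t 0))
        = (((List.range k).filter (fun i =>
            decide (nums.getD k 0 < nums.getD i 0) && !pvBadU nums k i))).reverse := by
      unfold pvStInv
      rw [List.filter_reverse, List.filter_filter]
    rw [hst]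
    exact foldl_min_perm _ _ (List.reverse_perm _) _

theorem foldl_inv (nums : List Int) (k : Nat) (hk : k ≤ nums.length) :
    (List.range k).foldl (stepA nums) ([], (nums.length : Int)) = (pvStInv nums k, pvLeftInv nums k) := by
  induction k with
  | zero => simp [pvStInv, pvLeftInv]
  | succ k ih =>
    have hk1 : k ≤ nums.length := Nat.le_of_succ_le hk
    rw [List.range_succ, List.foldl_append, ih hk1]
    simpa using stepA_inv nums k hk

theorem badU_eq_badSuf (nums : List Int) (i : Nat) (hi : i < nums.length) :
    pvBadU nums nums.length i = pvBadSuf nums i := by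
  rw [Bool.eq_iff_iff]
  simp only [pvBadU, pvBadSuf, List.any_eq_true, List.mem_range, decide_eq_true_eq,
    Bool.and_eq_true]
  constructor
  · rintro ⟨j, hjn, hij, hlt⟩
    refine ⟨nums.getD j 0, ?_, hlt⟩
    have hj' : j - (i + 1) < (nums.drop (i + 1)).length := by
      rw [List.length_drop]; omega
    refine List.mem_iff_getElem.mpr ⟨j - (i + 1), hj', ?_⟩
    rw [List.getElem_drop, List.getD_eq_getElem nums 0 hjn]
    simp only [show i + 1 + (j - (i + 1)) = j from by omega]
  · rintro ⟨y, hy, hlt⟩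
    rcases List.mem_iff_getElem.mp hy with ⟨idx, hidx, heq⟩
    have hlen : (nums.drop (i + 1)).length = nums.length - (i + 1) := List.length_drop
    refine ⟨i + 1 + idx, by omega, by omega, ?_⟩
    rw [List.getD_eq_getElem nums 0 (by omega)]
    rw [← List.getElem_drop]
    rw [heq]
    exact hlt
    exact hidx

theorem foldl_min_sorted (n : Nat) (l : List Nat) (hs : l.Pairwise (· < ·)) (hn : ∀ a ∈ l, a < n) :
    l.foldl pvMinF (n : Int) = ((l.headD n : Nat) : Int) := by
  cases l with
  | nil => rfl
  | cons h t =>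
    rcases List.pairwise_cons.mp hs with ⟨hht, _⟩
    have hhn : h < n := hn h (List.mem_cons_self)
    have hmin : pvMinF (n : Int) h = (h : Int) := by unfold pvMinF; omega
    simp only [List.foldl_cons, hmin]
    have haux : ∀ (t' : List Nat) (init : Int), (∀ a ∈ t', init ≤ (a : Int)) →
        t'.foldl pvMinF init = init := by
      intro t'
      induction t' with
      | nil => intro init _; rfl
      | cons b t'' ih' =>
        intro init hb
        have h1 : pvMinF init b = init := by
          have := hb b (List.mem_cons_self)
          unfold pvMinF
          omega
        simp only [List.foldl_cons, h1]
        exact ih' init (fun a ha => hb a (List.mem_cons_of_mem b ha))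
    exact haux t (h : Int) (fun a ha => by
      have := hht a ha
      omega)

theorem a_eq_firstBad (nums : List Int) :
    getMinimumUnsortedLeftIndex_py nums = pvFirstBad nums nums.length := by
  have h1 : getMinimumUnsortedLeftIndex_py nums = pvLeftInv nums nums.length := by
    unfold getMinimumUnsortedLeftIndex_py
    rw [foldl_inv nums nums.length (le_refl _)]
  rw [h1]
  unfold pvLeftInv pvFirstBad
  have hcongr : (List.range nums.length).filter (fun i => pvBadU nums nums.length i)
      = (List.range nums.length).filter (fun k => pvBadSuf nums k) := by
    apply List.filter_congr
    intro a ha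
    exact badU_eq_badSuf nums a (List.mem_range.mp ha)
  rw [hcongr]
  exact foldl_min_sorted nums.length _
    (List.pairwise_lt_range.sublist List.filter_sublist)
    (fun a ha => List.mem_range.mp (List.mem_filter.mp ha).1)

-- ===== VERDICT (by name: the statement is the Claim_ definition above) =====
theorem getMinimumUnsortedLeftIndex_py_spec : Claim_equal_getMinimumUnsortedLeftIndex_py := by
  intro nums _
  unfold Spec_getMinimumUnsortedLeftIndex_py
  rw [alt_eq_firstBad, a_eq_firstBad]
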